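-- pv_equiv track=rewrite | github.com/pavilk/unknown | run.py | parse
-- ===== SOURCE A (Python) =====
-- def parse(lines: list[str]) -> list[list[str]]:
--     a_room, b_room, c_room, d_room = [], [], [], []
--     for line in lines[2:-1]:
--         a_room.append(line[3])
--         b_room.append(line[5])
--         c_room.append(line[7])
--         d_room.append(line[9])
--     return [a_room, b_room, c_room, d_room]
-- ===== SOURCE B (Python) =====
-- def parse(lines: list[str]) -> list[list[str]]:
--     def go(body):
--         if not body:
--             return ([], [], [], [])
--         a, b, c, d = go(body[1:])
--         line = body[0]
--         return ([line[3]] + a, [line[5]] + b, [line[7]] + c, [line[9]] + d)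
--     a, b, c, d = go(lines[2:-1])
--     return [a, b, c, d]
-- ===== Notes on version B (the rewrite author's own statement) =====
-- stated objective: alternative
-- what changed: A's iterative loop with four appended-to accumulators is replaced by a structural recursion on the body that builds the four lists back-to-front by consing each line's characters onto the recursive result.
import Mathlib
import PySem

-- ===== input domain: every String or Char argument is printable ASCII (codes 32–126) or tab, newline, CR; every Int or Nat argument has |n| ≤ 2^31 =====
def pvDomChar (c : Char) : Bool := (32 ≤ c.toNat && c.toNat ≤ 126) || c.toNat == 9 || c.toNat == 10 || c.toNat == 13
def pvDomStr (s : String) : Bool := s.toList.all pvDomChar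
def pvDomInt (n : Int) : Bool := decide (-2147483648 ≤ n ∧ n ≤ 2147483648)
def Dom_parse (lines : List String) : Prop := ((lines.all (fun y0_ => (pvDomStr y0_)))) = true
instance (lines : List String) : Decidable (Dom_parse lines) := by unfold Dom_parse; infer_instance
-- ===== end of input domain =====

-- B replaces A's iterative pass with four appended-to accumulators by a structural recursion
-- that builds the four lists back-to-front by consing; same cost, different decomposition.

-- line[i] as a Python 1-character string; none (IndexError) is excluded by Pre_parse
def pvCharAt (s : String) (i : Int) : String :=
  match PySem.Str.pyGet? s i with
  | some c => String.ofList [c]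
  | none => ""

-- ===== PORT A =====
def parse (lines : List String) : List (List String) :=
  let r := (PySem.List.slice lines (some 2) (some (-1))).foldl
    (fun (acc : List String × List String × List String × List String) line =>
      (acc.1 ++ [pvCharAt line 3], acc.2.1 ++ [pvCharAt line 5],
       acc.2.2.1 ++ [pvCharAt line 7], acc.2.2.2 ++ [pvCharAt line 9]))
    ([], [], [], [])
  [r.1, r.2.1, r.2.2.1, r.2.2.2]

-- ===== PORT B =====
-- recursive helper 'go' from Source B: conses onto the recursive result
def parseGo : List String → List String × List String × List String × List String
  | [] => ([], [], [], [])
  | line :: rest =>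
    let r := parseGo rest
    (pvCharAt line 3 :: r.1, pvCharAt line 5 :: r.2.1,
     pvCharAt line 7 :: r.2.2.1, pvCharAt line 9 :: r.2.2.2)

def parse_alt (lines : List String) : List (List String) :=
  let r := parseGo (PySem.List.slice lines (some 2) (some (-1)))
  [r.1, r.2.1, r.2.2.1, r.2.2.2]

-- ===== PRECONDITION & SPEC =====
-- Pre_parse excludes inputs where A raises IndexError: some line of lines[2:-1] shorter than 10 chars.
def Pre_parse (lines : List String) : Prop :=
  ∀ s ∈ PySem.List.slice lines (some 2) (some (-1)), 10 ≤ PySem.Str.len s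
instance (lines : List String) : Decidable (Pre_parse lines) := by unfold Pre_parse; infer_instance
def pvWitness_parse : List String := ["##", "##", "#A#B#C#D#E", "end"]
def Spec_parse (lines : List String) (out : List (List String)) : Prop := out = parse_alt lines
instance (lines : List String) (out : List (List String)) : Decidable (Spec_parse lines out) := by unfold Spec_parse; infer_instance

-- ===== CLAIM =====
def Claim_equal_parse : Prop := ∀ (lines : List String), Dom_parse lines → Pre_parse lines → Spec_parse lines (parse lines)

-- ===== LEMMAS AND PROOFS =====
theorem parse_loop (ls a b c d : List String) :
    ls.foldl
      (fun (acc : List String × List String × List String × List String) line =>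
        (acc.1 ++ [pvCharAt line 3], acc.2.1 ++ [pvCharAt line 5],
         acc.2.2.1 ++ [pvCharAt line 7], acc.2.2.2 ++ [pvCharAt line 9]))
      (a, b, c, d)
    = (a ++ ls.map (fun l => pvCharAt l 3), b ++ ls.map (fun l => pvCharAt l 5),
       c ++ ls.map (fun l => pvCharAt l 7), d ++ ls.map (fun l => pvCharAt l 9)) := by
  induction ls generalizing a b c d with
  | nil => simp
  | cons x xs ih => simp [List.foldl, ih]

theorem parseGo_eq (ls : List String) :
    parseGo ls = (ls.map (fun l => pvCharAt l 3), ls.map (fun l => pvCharAt l 5),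
                  ls.map (fun l => pvCharAt l 7), ls.map (fun l => pvCharAt l 9)) := by
  induction ls with
  | nil => rfl
  | cons x xs ih => simp [parseGo, ih]

-- ===== VERDICT =====
theorem parse_spec : Claim_equal_parse := by
  intro lines _ _
  unfold Spec_parse parse parse_alt
  simp [parse_loop, parseGo_eq]
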